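-- pv_equiv track=rewrite | github.com/MusaEkmekcioglu/projects | python exercise/howmanydigit.py | ndigit
-- ===== SOURCE A (Python) =====
-- def ndigit(n):
--     result = 0
--     for i in range(1, n):
--         count = 0
--         while i!=0:
--             i//=10
--             count+=1
--         result+=count
--     return result
-- ===== SOURCE B (Python) =====
-- def ndigit(n):
--     # closed form: numbers with e+1 digits occupy [10**e, 10**(e+1)); each contributes e+1
--     total = 0
--     e = 0
--     while 10 ** e < n:
--         p = 10 ** e
--         hi = min(n - 1, 10 * p - 1)
--         total += (e + 1) * (hi - p + 1)
--         e += 1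
--     return total
-- ===== Notes on version B (the rewrite author's own statement) =====
-- stated objective: faster
-- what changed: Replaces the per-number digit-counting loop over range(1, n) by a closed-form sum over digit-length blocks [10**e, 10**(e+1)), one term per digit length.
import Mathlib
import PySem

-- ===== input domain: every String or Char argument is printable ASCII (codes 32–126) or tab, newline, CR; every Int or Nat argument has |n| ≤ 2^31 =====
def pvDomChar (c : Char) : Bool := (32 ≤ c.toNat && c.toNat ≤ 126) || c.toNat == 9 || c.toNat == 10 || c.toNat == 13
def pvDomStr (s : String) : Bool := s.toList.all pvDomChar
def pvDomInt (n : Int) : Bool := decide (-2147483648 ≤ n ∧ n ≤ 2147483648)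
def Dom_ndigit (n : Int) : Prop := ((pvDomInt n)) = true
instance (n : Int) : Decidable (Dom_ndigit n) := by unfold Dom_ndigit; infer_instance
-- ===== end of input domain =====

-- B replaces A's per-number digit-count loop over range(1, n) by a closed-form sum over
-- digit-length blocks [10^e, 10^(e+1)); measured asymptotically faster (O(log n) vs O(n log n)).


-- ===== PORT A =====
-- inner `while i != 0: i //= 10; count += 1`; i comes from range(1, n) so i ≥ 1,
-- where Nat `/` coincides with Python `//` (exact on that domain)
def digLoopA (i : Nat) (count : Int) : Int :=
  if h : i ≠ 0 then digLoopA (i / 10) (count + 1) else count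
  termination_by i
  decreasing_by exact Nat.div_lt_self (Nat.pos_of_ne_zero h) (by norm_num)

def ndigit (n : Int) : Int :=
  (PySem.List.pyRange 1 n 1).foldl (fun result i => result + digLoopA i.toNat 0) 0

-- ===== PORT B =====
-- `while 10 ** e < n: ...` from Source B
def altLoop (n : Int) (e : Nat) (total : Int) : Int :=
  if (10 : Int) ^ e < n then
    let p : Int := 10 ^ e
    let hi : Int := min (n - 1) (10 * p - 1)
    altLoop n (e + 1) (total + ((e : Int) + 1) * (hi - p + 1))
  else total
  termination_by n.toNat - 10 ^ e
  decreasing_by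
    rename_i hlt
    have h1 : (10 : Nat) ^ e < n.toNat := by
      rw [Int.lt_toNat]; push_cast; exact hlt
    have h2 : (10 : Nat) ^ e < 10 ^ (e + 1) := Nat.pow_lt_pow_succ (by norm_num)
    omega

def ndigit_alt (n : Int) : Int := altLoop n 0 0

-- ===== PRECONDITION & SPEC =====
def Spec_ndigit (n : Int) (out : Int) : Prop := out = ndigit_alt n
instance (n : Int) (out : Int) : Decidable (Spec_ndigit n out) := by unfold Spec_ndigit; infer_instance

-- ===== CLAIM (what is proved, stated in full; the proofs are below) =====
def Claim_equal_ndigit : Prop := ∀ (n : Int), Dom_ndigit n → Spec_ndigit n (ndigit n)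

-- ===== LEMMAS AND PROOFS =====

-- reference digit count
def Dg (i : Nat) : Nat :=
  if h : i ≠ 0 then Dg (i / 10) + 1 else 0
  termination_by i
  decreasing_by exact Nat.div_lt_self (Nat.pos_of_ne_zero h) (by norm_num)

lemma digLoopA_eq (i : Nat) : ∀ c, digLoopA i c = c + (Dg i : Int) := by
  induction i using Nat.strong_induction_on with
  | _ i ih =>
    intro c
    by_cases h : i = 0
    · subst h; rw [digLoopA, Dg]; simp
    · rw [digLoopA, Dg]
      simp only [h, ne_eq, not_false_eq_true, dif_pos]
      rw [ih (i / 10) (Nat.div_lt_self (Nat.pos_of_ne_zero h) (by norm_num))]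
      push_cast; ring

lemma Dg_block (e : Nat) : ∀ i, 10 ^ e ≤ i → i < 10 ^ (e + 1) → Dg i = e + 1 := by
  induction e with
  | zero =>
    intro i h1 h2
    rw [Dg]
    have hne : i ≠ 0 := by omega
    have : i / 10 = 0 := Nat.div_eq_of_lt (by omega)
    simp [hne, this, Dg]
  | succ e ih =>
    intro i h1 h2
    have hne : i ≠ 0 := by
      have : 0 < 10 ^ (e + 1) := Nat.pow_pos (by norm_num)
      omega
    rw [Dg]
    simp only [hne, dif_pos, ne_eq, not_false_eq_true]
    have hlo : 10 ^ e ≤ i / 10 := by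
      rw [Nat.le_div_iff_mul_le (by norm_num)]
      calc 10 ^ e * 10 = 10 ^ (e + 1) := by ring
        _ ≤ i := h1
    have hhi : i / 10 < 10 ^ (e + 1) := by
      rw [Nat.div_lt_iff_lt_mul (by norm_num)]
      calc i < 10 ^ (e + 2) := h2
        _ = 10 ^ (e + 1) * 10 := by ring
    rw [ih _ hlo hhi]

lemma foldl_add_map (f : Nat → Int) (l : List Nat) : ∀ c : Int,
    l.foldl (fun r k => r + f k) c = c + (l.map f).sum := by
  induction l with
  | nil => intro c; simp
  | cons x xs ih => intro c; simp [List.foldl_cons, ih]; ring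

lemma sum_map_range (f : Nat → Int) (m : Nat) :
    ((List.range m).map f).sum = ∑ k ∈ Finset.range m, f k := by
  induction m with
  | zero => simp
  | succ m ih => rw [List.range_succ, Finset.sum_range_succ]; simp [ih]

lemma ndigit_eq_sum (n : Int) : ndigit n = ∑ i ∈ Finset.Ico 1 n.toNat, (Dg i : Int) := by
  unfold ndigit
  rw [PySem.List.pyRange_one]
  rw [List.foldl_map]
  have hstep : ∀ (r : Int) (k : Nat),
      r + digLoopA ((1 : Int) + (k : Int)).toNat 0 = r + (Dg (k + 1) : Int) := by
    intro r k
    have ht : ((1 : Int) + (k : Int)).toNat = k + 1 := by omega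
    rw [ht, digLoopA_eq]; ring
  rw [show (fun (x : Int) (y : ℕ) => x + digLoopA ((1 : Int) + (y : Int)).toNat 0)
      = (fun (x : Int) (y : ℕ) => x + (Dg (y + 1) : Int))
    from funext fun r => funext fun k => hstep r k]
  rw [foldl_add_map, sum_map_range]
  rw [show (∑ k ∈ Finset.range (n - 1).toNat, (Dg (k + 1) : Int))
      = ∑ i ∈ Finset.Ico 1 ((n - 1).toNat + 1), (Dg i : Int) by
    rw [Finset.sum_Ico_eq_sum_range]
    simp [Nat.add_comm]]
  by_cases hn : 1 ≤ n
  · have : (n - 1).toNat + 1 = n.toNat := by omega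
    rw [this]; ring
  · have h1 : (n - 1).toNat = 0 := by omega
    have h2 : n.toNat = 0 := by omega
    rw [h1, h2]; simp

lemma altLoop_eq_sum (n : Int) : ∀ e total, altLoop n e total
    = total + ∑ i ∈ Finset.Ico (10 ^ e) n.toNat, (Dg i : Int) := by
  intro e
  induction hm : n.toNat - 10 ^ e using Nat.strong_induction_on generalizing e with
  | _ m ih =>
    intro total
    rw [altLoop]
    by_cases hlt : (10 : Int) ^ e < n
    · simp only [hlt, if_pos]
      have hP : (10 : Nat) ^ e < n.toNat := by rw [Int.lt_toNat]; push_cast; exact hlt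
      have hP1 : (10 : Nat) ^ e < 10 ^ (e + 1) := Nat.pow_lt_pow_succ (by norm_num)
      rw [ih (n.toNat - 10 ^ (e + 1)) (by omega) (e + 1) rfl]
      -- split the Ico at min n.toNat (10^(e+1))
      set P : Nat := 10 ^ e with hPdef
      set M : Nat := min n.toNat (10 ^ (e + 1)) with hMdef
      have hPM : P ≤ M := le_min hP.le hP1.le
      have hsplit : ∑ i ∈ Finset.Ico P n.toNat, (Dg i : Int)
          = (∑ i ∈ Finset.Ico P M, (Dg i : Int)) + ∑ i ∈ Finset.Ico (10 ^ (e + 1)) n.toNat, (Dg i : Int) := by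
        rw [← Finset.sum_Ico_consecutive (fun i => (Dg i : Int)) hPM (min_le_left _ _)]
        congr 1
        by_cases hc : 10 ^ (e + 1) ≤ n.toNat
        · rw [hMdef, min_eq_right hc]
        · rw [hMdef, min_eq_left (by omega), Finset.Ico_self,
            Finset.Ico_eq_empty (by omega)]
      have hconst : ∑ i ∈ Finset.Ico P M, (Dg i : Int) = ((e : Int) + 1) * ((M : Int) - (P : Int)) := by
        have h1 : ∑ i ∈ Finset.Ico P M, (Dg i : Int) = ∑ _i ∈ Finset.Ico P M, ((e : Int) + 1) :=
          Finset.sum_congr rfl (fun i hi => by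
            rw [Finset.mem_Ico] at hi
            have hub : i < 10 ^ (e + 1) := lt_of_lt_of_le hi.2 (min_le_right _ _)
            rw [Dg_block e i hi.1 hub]; push_cast; ring)
        rw [h1, Finset.sum_const, Nat.card_Ico, nsmul_eq_mul]
        push_cast [Nat.cast_sub hPM]
        ring
      rw [hsplit, hconst]
      have hn0 : (0 : Int) < n := lt_of_le_of_lt (by positivity) hlt
      have hMcast : (M : Int) = min n ((10 : Int) ^ (e + 1)) := by
        rw [hMdef]
        push_cast
        rw [Int.toNat_of_nonneg (le_of_lt hn0)]
      have hPcast : (P : Int) = (10 : Int) ^ e := by rw [hPdef]; push_cast; ring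
      rw [hMcast, hPcast]
      have h10 : (10 : Int) ^ (e + 1) = 10 * 10 ^ e := by ring
      rcases le_total n ((10 : Int) ^ (e + 1)) with hc | hc
      · rw [min_eq_left hc, min_eq_left (by omega)]; ring
      · rw [min_eq_right hc, min_eq_right (by omega)]; ring
    · simp only [hlt, if_neg, not_false_eq_true]
      have : Finset.Ico (10 ^ e) n.toNat = ∅ := by
        apply Finset.Ico_eq_empty
        intro hlt2
        apply hlt
        calc (10:Int) ^ e = ((10 ^ e : Nat) : Int) := by push_cast; ring
          _ < n := by
            rw [Int.lt_toNat] at hlt2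
            exact_mod_cast hlt2
      rw [this]; simp

-- ===== VERDICT =====
theorem ndigit_spec : Claim_equal_ndigit := by
  intro n _
  unfold Spec_ndigit ndigit_alt
  rw [altLoop_eq_sum n 0 0, ndigit_eq_sum]
  simp
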